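-- pv_equiv track=rewrite | github.com/mittgaurav/Pietone | graph_operations_2.py | shortest_return_no_repeat
-- ===== SOURCE A (Python) =====
-- def shortest_return_no_repeat(s):
--     """Given string of NESW direction return
--     the shortest path back to starting point
--     except for any node or edge of before"""
--     from collections import deque
--
--     if not s: return ''
--
--     # Find nodes traversed in onward journey
--     # and the ending point. Starts at origin
--     visited = set()
--     prev = (0, 0)
--     for c in s:
--         if c == 'N': prev = (prev[0], prev[1] + 1)
--         if c == 'S': prev = (prev[0], prev[1] - 1)
--         if c == 'E': prev = (prev[0] + 1, prev[1])
--         if c == 'W': prev = (prev[0] - 1, prev[1])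
--         visited.add(prev)
--
--     # We're caching the path to this node.
--     # Can be performant with backtracking.
--     path = {prev: ''}
--     q = deque()
--     q.append(prev)
--     while q:
--         node = q.popleft()
--         for i, j, c in [[0, 1, 'N'], [0, -1, 'S'], [-1, 0, 'W'], [1, 0, 'E']]:
--             next = (node[0] + i, node[1] + j)
--             # This node is already visited in either
--             # onwards journey, or in this traversal.
--             if next in visited: continue
--             path[next] = path[node] + c
--             if next == (0, 0):
--                 return path[next]
--             q.append(next)
--             visited.add(next)
--     return 'ERROR'
-- ===== SOURCE B (Python) =====
-- def shortest_return_no_repeat(s):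
--     """Parent-pointer BFS: record (predecessor, direction) per discovered node
--     and rebuild the return path by backtracking from the origin, instead of
--     caching a full path string per node."""
--     from collections import deque
--     if not s:
--         return ''
--     DELTAS = {'N': (0, 1), 'S': (0, -1), 'E': (1, 0), 'W': (-1, 0)}
--     pos = (0, 0)
--     visited = set()
--     for ch in s:
--         dx, dy = DELTAS.get(ch, (0, 0))
--         pos = (pos[0] + dx, pos[1] + dy)
--         visited.add(pos)
--     parent = {}
--     q = deque([pos])
--     while q:
--         node = q.popleft()
--         for dx, dy, c in ((0, 1, 'N'), (0, -1, 'S'), (-1, 0, 'W'), (1, 0, 'E')):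
--             nxt = (node[0] + dx, node[1] + dy)
--             if nxt in visited:
--                 continue
--             parent[nxt] = (node, c)
--             if nxt == (0, 0):
--                 out = []
--                 cur = (0, 0)
--                 while cur in parent:
--                     p, d = parent[cur]
--                     out.append(d)
--                     cur = p
--                 return ''.join(reversed(out))
--             q.append(nxt)
--             visited.add(nxt)
--     return 'ERROR'
-- ===== Notes on version B (the rewrite author's own statement) =====
-- stated objective: alternative
-- what changed: The BFS no longer caches a full path string per node: it stores a parent pointer (predecessor, direction) per discovered node and reconstructs the answer once by backtracking from the origin; the onward scan uses a delta table instead of four if-chains.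
import Mathlib
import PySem

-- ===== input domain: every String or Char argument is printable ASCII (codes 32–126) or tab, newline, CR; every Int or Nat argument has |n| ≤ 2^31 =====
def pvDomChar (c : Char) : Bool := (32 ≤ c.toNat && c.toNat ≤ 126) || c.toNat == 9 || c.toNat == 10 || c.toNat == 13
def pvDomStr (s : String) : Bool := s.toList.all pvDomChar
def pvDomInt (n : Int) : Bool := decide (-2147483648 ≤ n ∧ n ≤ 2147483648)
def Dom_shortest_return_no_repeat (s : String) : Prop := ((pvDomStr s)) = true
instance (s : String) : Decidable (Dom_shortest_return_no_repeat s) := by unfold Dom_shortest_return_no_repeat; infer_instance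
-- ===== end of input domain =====

-- B stores a parent pointer (predecessor, direction) per BFS node and rebuilds the
-- answer by backtracking from the origin, instead of caching a path string per node
-- (objective: alternative, same asymptotic cost on the explored region).

-- ===== PORT A =====
-- onward journey: four chained ifs, add position after each char (exactly A's loop)
def pvWalkA (cs : List Char) : PySem.Set (Int × Int) × (Int × Int) :=
  cs.foldl (fun (st : PySem.Set (Int × Int) × (Int × Int)) c =>
    let p0 := st.2
    let p1 := if c = 'N' then (p0.1, p0.2 + 1) else p0
    let p2 := if c = 'S' then (p1.1, p1.2 - 1) else p1
    let p3 := if c = 'E' then (p2.1 + 1, p2.2) else p2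
    let p4 := if c = 'W' then (p3.1 - 1, p3.2) else p3
    (st.1.add p4, p4)) (PySem.Set.empty, (0, 0))

-- the inner `for i, j, c in [...]` with its early `return path[next]` (.inl = return)
def pvStepA (node : Int × Int) :
    List ((Int × Int) × Char) → PySem.Set (Int × Int) → PySem.Dict (Int × Int) String →
    List (Int × Int) →
    String ⊕ (PySem.Set (Int × Int) × PySem.Dict (Int × Int) String × List (Int × Int))
  | [], visited, path, q => .inr (visited, path, q)
  | (d, c) :: rest, visited, path, q =>
    let next : Int × Int := (node.1 + d.1, node.2 + d.2)
    if visited.contains next then pvStepA node rest visited path q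
    else
      let path' := path.insert next (path.getD node "" ++ c.toString)
      if next = ((0 : Int), (0 : Int)) then .inl (path'.getD next "")
      else pvStepA node rest (visited.add next) path' (q ++ [next])

-- the `while q` loop; fuel only makes it total (never exhausted on inputs where the Python returns)
def pvLoopA : Nat → PySem.Set (Int × Int) → PySem.Dict (Int × Int) String → List (Int × Int) → String
  | 0, _, _, _ => "ERROR"
  | fuel + 1, visited, path, q =>
    match q with
    | [] => "ERROR"
    | node :: rest =>
      match pvStepA node [((0, 1), 'N'), ((0, -1), 'S'), ((-1, 0), 'W'), ((1, 0), 'E')]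
          visited path rest with
      | .inl out => out
      | .inr (v, p, q') => pvLoopA fuel v p q'

def pvFuel (n : Nat) : Nat := (2 * n + 9) ^ 4 + 1

def shortest_return_no_repeat (s : String) : String :=
  if s = "" then ""
  else
    let w := pvWalkA s.toList
    pvLoopA (pvFuel s.toList.length) w.1
      ((PySem.Dict.empty : PySem.Dict (Int × Int) String).insert w.2 "") [w.2]

-- ===== PORT B =====
-- onward journey via a delta table (DELTAS.get(ch, (0,0)))
def pvDeltaB (c : Char) : Int × Int :=
  (PySem.Dict.ofList
    [('N', ((0 : Int), (1 : Int))), ('S', (0, -1)), ('E', (1, 0)), ('W', (-1, 0))]).getD c (0, 0)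

def pvWalkB (cs : List Char) : PySem.Set (Int × Int) × (Int × Int) :=
  cs.foldl (fun (st : PySem.Set (Int × Int) × (Int × Int)) c =>
    let d := pvDeltaB c
    let pos := (st.2.1 + d.1, st.2.2 + d.2)
    (st.1.add pos, pos)) (PySem.Set.empty, (0, 0))

-- `while cur in parent: out.append(d); cur = p` — fuel parent.size+1 provably covers the chain
def pvRbB : Nat → PySem.Dict (Int × Int) ((Int × Int) × Char) → (Int × Int) → List Char → List Char
  | 0, _, _, out => out
  | fuel + 1, parent, cur, out =>
    match parent.get? cur with
    | none => out
    | some pc => pvRbB fuel parent pc.1 (out ++ [pc.2])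

def pvStepB (node : Int × Int) :
    List ((Int × Int) × Char) → PySem.Set (Int × Int) →
    PySem.Dict (Int × Int) ((Int × Int) × Char) → List (Int × Int) →
    String ⊕ (PySem.Set (Int × Int) × PySem.Dict (Int × Int) ((Int × Int) × Char) × List (Int × Int))
  | [], visited, parent, q => .inr (visited, parent, q)
  | (d, c) :: rest, visited, parent, q =>
    let next : Int × Int := (node.1 + d.1, node.2 + d.2)
    if visited.contains next then pvStepB node rest visited parent q
    else
      let parent' := parent.insert next (node, c)
      if next = ((0 : Int), (0 : Int)) then
        .inl (String.ofList ((pvRbB (parent'.size + 1) parent' next []).reverse))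
      else pvStepB node rest (visited.add next) parent' (q ++ [next])

def pvLoopB : Nat → PySem.Set (Int × Int) → PySem.Dict (Int × Int) ((Int × Int) × Char) →
    List (Int × Int) → String
  | 0, _, _, _ => "ERROR"
  | fuel + 1, visited, parent, q =>
    match q with
    | [] => "ERROR"
    | node :: rest =>
      match pvStepB node [((0, 1), 'N'), ((0, -1), 'S'), ((-1, 0), 'W'), ((1, 0), 'E')]
          visited parent rest with
      | .inl out => out
      | .inr (v, p, q') => pvLoopB fuel v p q'

def shortest_return_no_repeat_alt (s : String) : String :=
  if s = "" then ""
  else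
    let w := pvWalkB s.toList
    pvLoopB (pvFuel s.toList.length) w.1 PySem.Dict.empty [w.2]

-- ===== PRECONDITION & SPEC =====
-- (A's BFS loops forever on some inputs and returns on the rest; the equality of the two
-- ports below holds for every input, so no Pre_ is needed.)
def Spec_shortest_return_no_repeat (s : String) (out : String) : Prop := out = shortest_return_no_repeat_alt s
instance (s : String) (out : String) : Decidable (Spec_shortest_return_no_repeat s out) := by unfold Spec_shortest_return_no_repeat; infer_instance

-- ===== CLAIM (what is proved, stated in full; the proofs are below) =====
def Claim_equal_shortest_return_no_repeat : Prop := ∀ (s : String), Dom_shortest_return_no_repeat s → Spec_shortest_return_no_repeat s (shortest_return_no_repeat s)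

-- ===== LEMMAS AND PROOFS =====

-- contains on PySem.Set as membership
theorem pvSetContains_iff {x : Int × Int} {S : PySem.Set (Int × Int)} :
    S.contains x = true ↔ x ∈ S := by
  simp [PySem.Set.contains]

-- the loop state invariant tying A's path strings to B's parent pointers
def pvStInv (visited : PySem.Set (Int × Int)) (path : PySem.Dict (Int × Int) String)
    (parent : PySem.Dict (Int × Int) ((Int × Int) × Char)) : Prop :=
  (∀ k, parent.contains k = true → path.contains k = true) ∧
  (∀ k, path.contains k = true → visited.contains k = true) ∧
  (∀ k str, path.get? k = some str →
    str.toList.length ≤ parent.size ∧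
    ∀ f : Nat, str.toList.length ≤ f →
      ∀ P : PySem.Dict (Int × Int) ((Int × Int) × Char),
        (∀ x, path.contains x = true → P.get? x = parent.get? x) →
        pvRbB f P k [] = str.toList.reverse)

theorem pvRbB_append (f : Nat) :
    ∀ (P : PySem.Dict (Int × Int) ((Int × Int) × Char)) (cur : Int × Int) (out : List Char),
      pvRbB f P cur out = out ++ pvRbB f P cur [] := by
  induction f with
  | zero => intro P cur out; simp [pvRbB]
  | succ f ih =>
    intro P cur out
    cases h : P.get? cur with
    | none => simp [pvRbB, h]
    | some pc =>
      simp only [pvRbB, h]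
      rw [ih P pc.1 (out ++ [pc.2]), ih P pc.1 ([] ++ [pc.2])]
      simp

theorem pvStInv_insert (visited : PySem.Set (Int × Int)) (path : PySem.Dict (Int × Int) String)
    (parent : PySem.Dict (Int × Int) ((Int × Int) × Char)) (node next : Int × Int) (c : Char)
    (strN : String) (inv : pvStInv visited path parent) (hget : path.get? node = some strN)
    (hnv : visited.contains next = false) :
    pvStInv (visited.add next) (path.insert next (strN ++ c.toString))
      (parent.insert next (node, c)) := by
  obtain ⟨invPP, invPV, invRb⟩ := inv
  have hnp : path.contains next = false := by
    cases h : path.contains next with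
    | false => rfl
    | true => rw [invPV _ h] at hnv; exact absurd hnv (by simp)
  have hnpar : parent.contains next = false := by
    cases h : parent.contains next with
    | false => rfl
    | true => rw [invPP _ h] at hnp; exact absurd hnp (by simp)
  have hsizek : (parent.insert next (node, c)).size = parent.size + 1 := by
    rw [PySem.Dict.size_insert]; simp [hnpar]
  have hagree : ∀ (P : PySem.Dict (Int × Int) ((Int × Int) × Char)),
      (∀ x, (path.insert next (strN ++ c.toString)).contains x = true →
        P.get? x = (parent.insert next (node, c)).get? x) →
      (∀ x, path.contains x = true → P.get? x = parent.get? x) := by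
    intro P hP x hx
    have hxn : x ≠ next := by rintro rfl; rw [hnp] at hx; exact Bool.false_ne_true hx
    have hx' : (path.insert next (strN ++ c.toString)).contains x = true := by
      rw [PySem.Dict.contains_insert]; simp [hx]
    rw [hP x hx', PySem.Dict.get?_insert_of_ne _ _ hxn]
  refine ⟨?_, ?_, ?_⟩
  · intro k hk
    rw [PySem.Dict.contains_insert] at hk ⊢
    rcases Bool.or_eq_true_iff.mp hk with h | h
    · simp [h]
    · simp [invPP _ h]
  · intro k hk
    rw [PySem.Dict.contains_insert] at hk
    rcases Bool.or_eq_true_iff.mp hk with h | h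
    · have : k = next := by simpa using h
      subst this
      exact pvSetContains_iff.mpr ((PySem.Set.mem_add _ _ _).mpr (Or.inr rfl))
    · exact pvSetContains_iff.mpr
        ((PySem.Set.mem_add _ _ _).mpr (Or.inl (pvSetContains_iff.mp (invPV _ h))))
  · intro k str hk
    rw [PySem.Dict.get?_insert] at hk
    by_cases hkn : k = next
    · rw [if_pos hkn] at hk
      injection hk with hk; subst hk; subst hkn
      have hlen : (strN ++ c.toString).toList.length = strN.toList.length + 1 := by
        simp
      constructor
      · rw [hlen, hsizek]
        exact Nat.add_le_add_right (invRb _ _ hget).1 1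
      · intro f hf P hP
        have hf1 : 1 ≤ f := le_trans (by omega) hf
        obtain ⟨f', rfl⟩ : ∃ f', f = f' + 1 := ⟨f - 1, by omega⟩
        have hPn : P.get? k = some (node, c) := by
          rw [hP k (PySem.Dict.contains_insert_self _ _ _), PySem.Dict.get?_insert_self]
        simp only [pvRbB, hPn]
        rw [pvRbB_append]
        have := (invRb _ _ hget).2 f' (by omega) P (hagree P hP)
        rw [this]
        simp [List.reverse_append]
    · rw [if_neg hkn] at hk
      obtain ⟨hsz, hrb⟩ := invRb _ _ hk
      constructor
      · rw [hsizek]; omega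
      · intro f hf P hP
        exact hrb f hf P (hagree P hP)

theorem pvStep_eq : ∀ (dirs : List ((Int × Int) × Char)) (node : Int × Int)
    (visited : PySem.Set (Int × Int)) (path : PySem.Dict (Int × Int) String)
    (parent : PySem.Dict (Int × Int) ((Int × Int) × Char)) (q : List (Int × Int)),
    pvStInv visited path parent →
    path.contains node = true →
    (∀ x ∈ q, path.contains x = true) →
    (∃ out, pvStepA node dirs visited path q = .inl out ∧
      pvStepB node dirs visited parent q = .inl out) ∨
    (∃ v p pa q', pvStepA node dirs visited path q = .inr (v, p, q') ∧
      pvStepB node dirs visited parent q = .inr (v, pa, q') ∧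
      pvStInv v p pa ∧ (∀ x ∈ q', p.contains x = true)) := by
  intro dirs
  induction dirs with
  | nil =>
    intro node visited path parent q inv hnode hq
    exact Or.inr ⟨visited, path, parent, q, rfl, rfl, inv, hq⟩
  | cons dc rest ih =>
    intro node visited path parent q inv hnode hq
    obtain ⟨d, c⟩ := dc
    obtain ⟨strN, hget⟩ : ∃ strN, path.get? node = some strN := by
      have := (PySem.Dict.contains_eq_isSome_get? path node).symm.trans hnode
      exact Option.isSome_iff_exists.mp this
    have hgetD : path.getD node "" = strN := PySem.Dict.getD_of_get?_eq_some _ _ hget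
    by_cases hv : visited.contains (node.1 + d.1, node.2 + d.2) = true
    · simp only [pvStepA, pvStepB, hv, if_pos]
      exact ih node visited path parent q inv hnode hq
    · have hv' : visited.contains (node.1 + d.1, node.2 + d.2) = false :=
        Bool.not_eq_true _ ▸ (by simpa using hv)
      have inv' := pvStInv_insert visited path parent node (node.1 + d.1, node.2 + d.2) c strN
        inv hget hv'
      by_cases hz : ((node.1 + d.1, node.2 + d.2) : Int × Int) = ((0 : Int), (0 : Int))
      · -- both return: A the cached string, B the rebuilt one
        simp only [pvStepA, pvStepB, hv', Bool.false_eq_true, if_false, if_pos hz, hgetD]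
        left
        refine ⟨strN ++ c.toString, ?_, ?_⟩
        · rw [PySem.Dict.getD_insert_self]
        obtain ⟨hsz, hrb⟩ := inv'.2.2 (node.1 + d.1, node.2 + d.2) (strN ++ c.toString)
          (PySem.Dict.get?_insert_self _ _ _)
        rw [hrb ((parent.insert (node.1 + d.1, node.2 + d.2) (node, c)).size + 1) (by omega)
          (parent.insert (node.1 + d.1, node.2 + d.2) (node, c)) (fun x _ => rfl)]
        rw [List.reverse_reverse, String.ofList_toList]
      · simp only [pvStepA, pvStepB, hv', Bool.false_eq_true, if_false, if_neg hz, hgetD]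
        apply ih
        · exact inv'
        · rw [PySem.Dict.contains_insert]; simp [hnode]
        · intro x hx
          rw [PySem.Dict.contains_insert]
          rcases List.mem_append.mp hx with h | h
          · simp [hq x h]
          · simp at h; subst h; simp
 
theorem pvLoop_eq : ∀ (fuel : Nat) (visited : PySem.Set (Int × Int))
    (path : PySem.Dict (Int × Int) String)
    (parent : PySem.Dict (Int × Int) ((Int × Int) × Char)) (q : List (Int × Int)),
    pvStInv visited path parent → (∀ x ∈ q, path.contains x = true) →
    pvLoopA fuel visited path q = pvLoopB fuel visited parent q := by
  intro fuel
  induction fuel with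
  | zero => intros; rfl
  | succ fuel ih =>
    intro visited path parent q inv hq
    cases q with
    | nil => rfl
    | cons node rest =>
      rcases pvStep_eq [((0, 1), 'N'), ((0, -1), 'S'), ((-1, 0), 'W'), ((1, 0), 'E')] node
          visited path parent rest inv (hq node (List.mem_cons_self))
          (fun x hx => hq x (List.mem_cons_of_mem _ hx)) with
        ⟨out, ha, hb⟩ | ⟨v, p, pa, q', ha, hb, inv', hq'⟩
      · simp only [pvLoopA, pvLoopB, ha, hb]
      · simp only [pvLoopA, pvLoopB, ha, hb]
        exact ih v p pa q' inv' hq'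

theorem pvDeltaB_other {c : Char} (hN : c ≠ 'N') (hS : c ≠ 'S') (hE : c ≠ 'E') (hW : c ≠ 'W') :
    pvDeltaB c = (0, 0) := by
  have : (PySem.Dict.ofList
      [('N', ((0 : Int), (1 : Int))), ('S', (0, -1)), ('E', (1, 0)), ('W', (-1, 0))]).contains c
      = false := by
    have h := PySem.Dict.contains_eq_decide_mem_keys (κ := Char)
      (d := PySem.Dict.ofList
        [('N', ((0 : Int), (1 : Int))), ('S', (0, -1)), ('E', (1, 0)), ('W', (-1, 0))]) (k := c)
    rw [h]
    have hk : (PySem.Dict.ofList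
        [('N', ((0 : Int), (1 : Int))), ('S', (0, -1)), ('E', (1, 0)), ('W', (-1, 0))]).keys
        = ['N', 'S', 'E', 'W'] := by decide
    rw [hk]
    simp [hN, hS, hE, hW]
  exact PySem.Dict.getD_of_not_contains _ _ this

theorem pvDeltaB_N : pvDeltaB 'N' = ((0 : Int), (1 : Int)) := by decide
theorem pvDeltaB_S : pvDeltaB 'S' = ((0 : Int), (-1 : Int)) := by decide
theorem pvDeltaB_E : pvDeltaB 'E' = ((1 : Int), (0 : Int)) := by decide
theorem pvDeltaB_W : pvDeltaB 'W' = ((-1 : Int), (0 : Int)) := by decide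

theorem pvWalk_step_eq :
    (fun (st : PySem.Set (Int × Int) × (Int × Int)) c =>
      let p0 := st.2
      let p1 := if c = 'N' then (p0.1, p0.2 + 1) else p0
      let p2 := if c = 'S' then (p1.1, p1.2 - 1) else p1
      let p3 := if c = 'E' then (p2.1 + 1, p2.2) else p2
      let p4 := if c = 'W' then (p3.1 - 1, p3.2) else p3
      ((st.1.add p4, p4) : PySem.Set (Int × Int) × (Int × Int))) =
    (fun (st : PySem.Set (Int × Int) × (Int × Int)) c =>
      let d := pvDeltaB c
      let pos := (st.2.1 + d.1, st.2.2 + d.2)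
      (st.1.add pos, pos)) := by
  funext st c
  by_cases hN : c = 'N'
  · subst hN; simp [pvDeltaB_N]
  · by_cases hS : c = 'S'
    · subst hS; simp [pvDeltaB_S, hN, sub_eq_add_neg]
    · by_cases hE : c = 'E'
      · subst hE; simp [pvDeltaB_E, hN, hS]
      · by_cases hW : c = 'W'
        · subst hW; simp [pvDeltaB_W, hN, hS, hE, sub_eq_add_neg]
        · simp [pvDeltaB_other hN hS hE hW, hN, hS, hE, hW]

theorem pvWalk_eq (cs : List Char) : pvWalkA cs = pvWalkB cs := by
  unfold pvWalkA pvWalkB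
  rw [pvWalk_step_eq]

theorem pvWalkA_snd_mem (cs : List Char) (h : cs ≠ []) :
    (pvWalkA cs).1.contains (pvWalkA cs).2 = true := by
  obtain ⟨l, c, rfl⟩ := List.eq_nil_or_concat cs |>.resolve_left h
  unfold pvWalkA
  rw [List.concat_eq_append, List.foldl_append]
  simp only [List.foldl_cons, List.foldl_nil]
  exact pvSetContains_iff.mpr ((PySem.Set.mem_add _ _ _).mpr (Or.inr rfl))

theorem pvStInv_init (visited : PySem.Set (Int × Int)) (prev : Int × Int)
    (hvp : visited.contains prev = true) :
    pvStInv visited ((PySem.Dict.empty : PySem.Dict (Int × Int) String).insert prev "")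
      PySem.Dict.empty := by
  refine ⟨?_, ?_, ?_⟩
  · intro k hk; rw [PySem.Dict.contains_empty] at hk; exact absurd hk (by simp)
  · intro k hk
    rw [PySem.Dict.contains_insert] at hk
    rcases Bool.or_eq_true_iff.mp hk with h | h
    · have : k = prev := by simpa using h
      subst this; exact hvp
    · rw [PySem.Dict.contains_empty] at h; exact absurd h (by simp)
  · intro k str hk
    rw [PySem.Dict.get?_insert] at hk
    by_cases hkp : k = prev
    · rw [if_pos hkp] at hk
      injection hk with hk; subst hk; subst hkp
      refine ⟨by simp, ?_⟩
      intro f _ P hP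
      have hPk : P.get? k = none := by
        rw [hP k (PySem.Dict.contains_insert_self _ _ _), PySem.Dict.get?_empty]
      cases f with
      | zero => simp [pvRbB]
      | succ f => simp [pvRbB, hPk]
    · rw [if_neg hkp, PySem.Dict.get?_empty] at hk; exact absurd hk (by simp)

-- ===== VERDICT (by name: the statement is the Claim_ definition above) =====
theorem shortest_return_no_repeat_spec : Claim_equal_shortest_return_no_repeat := by
  unfold Claim_equal_shortest_return_no_repeat
  intro s _
  unfold Spec_shortest_return_no_repeat
  unfold shortest_return_no_repeat shortest_return_no_repeat_alt
  by_cases hs : s = ""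
  · simp [hs]
  · simp only [if_neg hs]
    rw [← pvWalk_eq]
    have hne : s.toList ≠ [] := by
      intro h; exact hs (String.toList_eq_nil_iff.mp h)
    exact pvLoop_eq (pvFuel s.toList.length) (pvWalkA s.toList).1 _ _ [(pvWalkA s.toList).2]
      (pvStInv_init _ _ (pvWalkA_snd_mem _ hne))
      (by intro x hx
          simp only [List.mem_singleton] at hx
          subst hx
          exact PySem.Dict.contains_insert_self _ _ _)
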